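-- pv_equiv track=rewrite | github.com/ClusterLabs/fence-agents | fence/agents/vmware/fence_vmware.py | dsv_split
-- ===== SOURCE A (Python) =====
-- def dsv_split(dsv_str):
-- 	delimiter_c = ':'
-- 	escape_c = '\\'
--
-- 	res = []
-- 	status = 0
-- 	tmp_str = ""
--
-- 	for x in dsv_str:
-- 		if status == 0:
-- 			if x == delimiter_c:
-- 				res.append(tmp_str)
-- 				tmp_str = ""
-- 			elif x == escape_c:
-- 				status = 1
-- 			else:
-- 				tmp_str += x
-- 		elif status == 1:
-- 			if x == delimiter_c:
-- 				tmp_str += delimiter_c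
-- 			elif x == escape_c:
-- 				tmp_str += escape_c
-- 			else:
-- 				tmp_str += escape_c+x
-- 			status = 0
--
-- 	if tmp_str != "":
-- 		res.append(tmp_str)
--
-- 	return res
-- ===== SOURCE B (Python) =====
-- def dsv_split(dsv_str):
--     res = []
--     field = []           # characters of the current field
--     i = 0
--     n = len(dsv_str)
--     while i < n:
--         c = dsv_str[i]
--         if c == '\\':
--             if i + 1 < n:
--                 nxt = dsv_str[i + 1]
--                 if nxt == ':' or nxt == '\\':
--                     field.append(nxt)
--                 else:
--                     field.append('\\')
--                     field.append(nxt)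
--                 i += 2
--             else:
--                 i += 1   # trailing lone escape is dropped
--         elif c == ':':
--             res.append(''.join(field))
--             field = []
--             i += 1
--         else:
--             field.append(c)
--             i += 1
--     if field:
--         res.append(''.join(field))
--     return res
-- ===== Notes on version B (the rewrite author's own statement) =====
-- stated objective: alternative
-- what changed: Replaces A's status-flag state machine with an index-based loop that consumes escape sequences in one step by looking ahead at the next character, so no escape state is carried between iterations.
import Mathlib
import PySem

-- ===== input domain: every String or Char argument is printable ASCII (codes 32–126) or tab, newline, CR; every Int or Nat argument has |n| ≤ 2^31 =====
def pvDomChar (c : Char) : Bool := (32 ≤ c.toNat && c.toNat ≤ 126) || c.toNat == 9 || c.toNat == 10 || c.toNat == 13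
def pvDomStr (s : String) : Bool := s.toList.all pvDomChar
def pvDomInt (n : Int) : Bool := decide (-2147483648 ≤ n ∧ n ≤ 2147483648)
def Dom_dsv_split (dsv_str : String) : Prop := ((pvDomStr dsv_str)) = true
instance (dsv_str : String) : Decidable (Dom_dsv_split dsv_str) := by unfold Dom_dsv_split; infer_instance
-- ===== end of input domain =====

-- B replaces A's status-flag state machine by an index loop with one-character look-ahead (objective: alternative decomposition, same cost).

-- ===== PORT A =====
-- A's for-loop over the characters, carrying (res, status, tmp); status 0/1 ported as Bool false/true.
def dsvGoA : List Char → Bool → String → List String → List String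
  | [], _, tmp, res => if tmp = "" then res else res ++ [tmp]
  | x :: rest, status, tmp, res =>
    if status = false then
      if x = ':' then dsvGoA rest false "" (res ++ [tmp])
      else if x = '\\' then dsvGoA rest true tmp res
      else dsvGoA rest false (tmp.push x) res
    else
      if x = ':' then dsvGoA rest false (tmp.push ':') res
      else if x = '\\' then dsvGoA rest false (tmp.push '\\') res
      else dsvGoA rest false ((tmp.push '\\').push x) res

def dsv_split (dsv_str : String) : List String := dsvGoA dsv_str.toList false "" []

-- ===== PORT B =====
-- B's while-loop with index look-ahead; the index walk over the string is the structural
-- recursion on the character list, the i+1 look-ahead is the match on the tail; the current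
-- field is a char list (Python list + ''.join), joined with String.ofList when flushed.
def dsvGoB : List Char → List Char → List String → List String
  | [], field, res => if field = [] then res else res ++ [String.ofList field]
  | c :: rest, field, res =>
    if c = '\\' then
      match rest with
      | [] => if field = [] then res else res ++ [String.ofList field]   -- i+1 out of range: drop escape, loop ends
      | nxt :: rest' =>
        if nxt = ':' ∨ nxt = '\\' then dsvGoB rest' (field ++ [nxt]) res
        else dsvGoB rest' (field ++ ['\\', nxt]) res
    else if c = ':' then dsvGoB rest [] (res ++ [String.ofList field])
    else dsvGoB rest (field ++ [c]) res

def dsv_split_alt (dsv_str : String) : List String := dsvGoB dsv_str.toList [] []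

-- ===== PRECONDITION & SPEC =====
def Spec_dsv_split (dsv_str : String) (out : List String) : Prop := out = dsv_split_alt dsv_str
instance (dsv_str : String) (out : List String) : Decidable (Spec_dsv_split dsv_str out) := by unfold Spec_dsv_split; infer_instance

-- ===== CLAIM (what is proved, stated in full; the proofs are below) =====
def Claim_equal_dsv_split : Prop := ∀ (dsv_str : String), Dom_dsv_split dsv_str → Spec_dsv_split dsv_str (dsv_split dsv_str)

-- ===== LEMMAS AND PROOFS =====
theorem dsvOfListPush (f : List Char) (c : Char) :
    (String.ofList f).push c = String.ofList (f ++ [c]) := by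
  apply String.toList_injective; simp

theorem dsvGo_eq : ∀ (n : ℕ) (l : List Char), l.length ≤ n →
    ∀ (f : List Char) (res : List String), dsvGoA l false (String.ofList f) res = dsvGoB l f res := by
  intro n
  induction n with
  | zero =>
    intro l hl f res
    have : l = [] := List.length_eq_zero_iff.mp (Nat.le_zero.mp hl)
    subst this
    simp [dsvGoA, dsvGoB, String.ofList_eq_empty_iff]
  | succ n ih =>
    intro l hl f res
    match l with
    | [] => simp [dsvGoA, dsvGoB, String.ofList_eq_empty_iff]
    | c :: rest =>
      simp only [List.length_cons, Nat.succ_le_succ_iff] at hl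
      by_cases hc : c = '\\'
      · subst hc
        match rest with
        | [] =>
          simp [dsvGoA, dsvGoB, String.ofList_eq_empty_iff]
        | y :: rest' =>
          simp only [List.length_cons] at hl
          have hl' : rest'.length ≤ n := Nat.le_of_succ_le hl
          by_cases hy : y = ':'
          · subst hy
            rw [show dsvGoB ('\\' :: ':' :: rest') f res = dsvGoB rest' (f ++ [':']) res by
              rw [dsvGoB.eq_def]; simp]
            rw [← ih rest' hl' (f ++ [':']) res, ← dsvOfListPush]
            simp [dsvGoA]
          · by_cases hy2 : y = '\\'
            · subst hy2
              rw [show dsvGoB ('\\' :: '\\' :: rest') f res = dsvGoB rest' (f ++ ['\\']) res by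
                rw [dsvGoB.eq_def]; simp]
              rw [← ih rest' hl' (f ++ ['\\']) res, ← dsvOfListPush]
              simp [dsvGoA]
            · rw [show dsvGoB ('\\' :: y :: rest') f res = dsvGoB rest' (f ++ ['\\', y]) res by
                rw [dsvGoB.eq_def]; simp [hy, hy2]]
              rw [← ih rest' hl' (f ++ ['\\', y]) res,
                  show f ++ ['\\', y] = (f ++ ['\\']) ++ [y] by simp,
                  ← dsvOfListPush, ← dsvOfListPush]
              simp [dsvGoA, hy, hy2]
      · by_cases hcol : c = ':'
        · subst hcol
          rw [show dsvGoB (':' :: rest) f res = dsvGoB rest [] (res ++ [String.ofList f]) by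
            rw [dsvGoB.eq_def]; simp]
          rw [← ih rest hl [] (res ++ [String.ofList f])]
          simp [dsvGoA]
        · rw [show dsvGoB (c :: rest) f res = dsvGoB rest (f ++ [c]) res by
            rw [dsvGoB.eq_def]; simp [hc, hcol]]
          rw [← ih rest hl (f ++ [c]) res, ← dsvOfListPush]
          simp [dsvGoA, hc, hcol]

-- ===== VERDICT (by name: the statement is the Claim_ definition above) =====
theorem dsv_split_spec : Claim_equal_dsv_split := by
  intro s _
  unfold Spec_dsv_split dsv_split dsv_split_alt
  exact dsvGo_eq s.toList.length s.toList le_rfl [] []
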